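-- pv_equiv track=rewrite | github.com/KernelFlow-ops/cuda-opt-agent | src/cuda_opt_agent/agent/nodes/reflect.py | _count_consecutive_rejects
-- ===== SOURCE A (Python) =====
-- def _count_consecutive_rejects(iterations: list) -> int:
--     count = 0
--     for it in reversed(iterations):
--         acc = it.get("accepted", False) if isinstance(it, dict) else getattr(it, "accepted", False)
--         if not acc:
--             count += 1
--         else:
--             break
--     return count
-- ===== SOURCE B (Python) =====
-- def _count_consecutive_rejects(iterations: list) -> int:
--     count = 0
--     for it in iterations:
--         count = 0 if it.get("accepted", False) else count + 1
--     return count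
-- ===== Notes on version B (the rewrite author's own statement) =====
-- stated objective: alternative
-- what changed: Replaced the reversed iteration with early break by a single forward full scan that resets a running counter to 0 on each accepted iteration, returning the final counter.
import Mathlib
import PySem

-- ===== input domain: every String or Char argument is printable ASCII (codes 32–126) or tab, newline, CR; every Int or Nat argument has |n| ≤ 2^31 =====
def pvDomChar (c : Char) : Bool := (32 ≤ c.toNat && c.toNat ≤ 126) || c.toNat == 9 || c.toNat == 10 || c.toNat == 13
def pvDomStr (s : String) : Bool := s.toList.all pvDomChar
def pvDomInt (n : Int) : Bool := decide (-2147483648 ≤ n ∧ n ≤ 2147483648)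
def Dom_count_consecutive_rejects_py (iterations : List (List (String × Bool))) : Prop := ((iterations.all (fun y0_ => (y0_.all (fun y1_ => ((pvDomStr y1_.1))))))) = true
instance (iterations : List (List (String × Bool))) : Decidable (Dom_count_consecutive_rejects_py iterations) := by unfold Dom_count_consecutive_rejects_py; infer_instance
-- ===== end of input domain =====

-- B replaces A's reversed loop with early break by one forward pass resetting a counter on acceptance (alternative decomposition, same result).


-- ===== PORT A =====
-- loop 'for it in reversed(iterations): … else break': recursion over the reversed list,
-- stopping (break) at the first accepted iteration.
def pvARevLoop (rev : List (List (String × Bool))) : Int :=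
  match rev with
  | [] => 0
  | it :: rest =>
    -- acc = it.get("accepted", False)  (it is a dict)
    if (PySem.Dict.mk it).getD "accepted" false then 0
    else pvARevLoop rest + 1

def count_consecutive_rejects_py (iterations : List (List (String × Bool))) : Int :=
  pvARevLoop iterations.reverse

-- ===== PORT B =====
-- single forward pass: reset the counter on accepted, otherwise increment.
def count_consecutive_rejects_py_alt (iterations : List (List (String × Bool))) : Int :=
  iterations.foldl
    (fun count it =>
      if (PySem.Dict.mk it).getD "accepted" false then 0 else count + 1)
    0

-- ===== PRECONDITION & SPEC =====
def Spec_count_consecutive_rejects_py (iterations : List (List (String × Bool))) (out : Int) : Prop := out = count_consecutive_rejects_py_alt iterations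
instance (iterations : List (List (String × Bool))) (out : Int) : Decidable (Spec_count_consecutive_rejects_py iterations out) := by unfold Spec_count_consecutive_rejects_py; infer_instance

-- ===== CLAIM (what is proved, stated in full; the proofs are below) =====
def Claim_equal_count_consecutive_rejects_py : Prop := ∀ (iterations : List (List (String × Bool))), Dom_count_consecutive_rejects_py iterations → Spec_count_consecutive_rejects_py iterations (count_consecutive_rejects_py iterations)

-- ===== LEMMAS AND PROOFS =====
theorem pvAB_eq (iterations : List (List (String × Bool))) :
    pvARevLoop iterations.reverse = count_consecutive_rejects_py_alt iterations := by
  unfold count_consecutive_rejects_py_alt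
  induction iterations using List.reverseRecOn with
  | nil => rfl
  | append_singleton xs it ih =>
    rw [List.reverse_append, List.foldl_append]
    by_cases h : ((PySem.Dict.mk it).getD "accepted" false : Bool)
    · simp [pvARevLoop, h]
    · simp [pvARevLoop, h, ih]

-- ===== VERDICT (by name: the statement is the Claim_ definition above) =====
theorem count_consecutive_rejects_py_spec : Claim_equal_count_consecutive_rejects_py := by
  intro iterations _
  show count_consecutive_rejects_py iterations = count_consecutive_rejects_py_alt iterations
  exact pvAB_eq iterations
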